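-- pv_equiv track=rewrite | github.com/MarkwwLiu/apiTest | api_test/exporters/standalone_exporter.py | _extract_module_body
-- ===== SOURCE A (Python) =====
-- def _extract_module_body(source: str) -> str:
--     """Extract the body of a Python module, stripping docstring and import lines.
--
--     Returns everything after the module docstring and import block.
--     """
--     lines = source.split("\n")
--     result: list[str] = []
--     in_docstring = False
--     past_header = False
--     docstring_quote: str | None = None
--
--     for line in lines:
--         stripped = line.strip()
--
--         if not past_header:
--             # Handle module docstring
--             if not in_docstring:
--                 if stripped.startswith('"""'):
--                     docstring_quote = '"""'
--                     if stripped.count('"""') >= 2 and len(stripped) > 3: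
--                         continue  # single-line docstring
--                     in_docstring = True
--                     continue
--                 elif stripped.startswith("'''"):
--                     docstring_quote = "'''"
--                     if stripped.count("'''") >= 2 and len(stripped) > 3:
--                         continue
--                     in_docstring = True
--                     continue
--             else:
--                 if docstring_quote and docstring_quote in stripped:
--                     in_docstring = False
--                     docstring_quote = None
--                 continue
--
--             # Skip import lines
--             if stripped.startswith("import ") or stripped.startswith("from "):
--                 continue
--
--             # Skip blank lines in the header
--             if not stripped:
--                 continue
--
--             # First real content line = body starts
--             past_header = True
--
--         result.append(line)
--
--     return "\n".join(result)
-- ===== SOURCE B (Python) =====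
-- def _extract_module_body(source: str) -> str:
--     lines = source.split("\n")
--     n = len(lines)
--     i = 0
--     while i < n:
--         s = lines[i].strip()
--         q = '"""' if s.startswith('"""') else ("'''" if s.startswith("'''") else None)
--         if q is not None:
--             i += 1
--             if s.count(q) >= 2 and len(s) > 3:
--                 continue  # single-line docstring
--             while i < n and q not in lines[i].strip():
--                 i += 1
--             i += 1  # skip the closing line (or run off the end)
--         elif s == "" or s.startswith("import ") or s.startswith("from "):
--             i += 1
--         else:
--             break
--     return "\n".join(lines[i:])
-- ===== Notes on version B (the rewrite author's own statement) =====
-- stated objective: simpler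
-- what changed: Replaces A's per-line state machine (in_docstring/past_header/docstring_quote flags plus a result accumulator appending every remaining line) by an index-advancing multi-phase scan that skips the header (docstrings via an inner closing-quote scan, then imports and blanks) and returns the untouched tail of the line list joined back with newlines.
import Mathlib
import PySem

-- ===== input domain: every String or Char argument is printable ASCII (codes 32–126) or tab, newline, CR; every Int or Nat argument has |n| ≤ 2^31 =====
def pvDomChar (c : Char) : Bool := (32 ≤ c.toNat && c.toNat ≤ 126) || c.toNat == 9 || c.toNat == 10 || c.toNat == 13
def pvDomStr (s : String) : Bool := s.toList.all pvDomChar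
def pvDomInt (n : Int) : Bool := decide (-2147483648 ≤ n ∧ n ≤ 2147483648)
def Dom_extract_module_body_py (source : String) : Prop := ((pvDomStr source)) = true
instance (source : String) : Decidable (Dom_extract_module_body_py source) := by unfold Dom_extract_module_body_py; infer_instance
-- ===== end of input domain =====

-- B replaces A's per-line flag state machine (in_docstring/past_header/result accumulator) by an
-- index-advancing multi-phase scan that returns the untouched tail of the line list; objective: simpler.

-- ===== PORT A =====
-- one loop iteration of A: state = (result, in_docstring, past_header, docstring_quote)
def pvStepA (st : List String × Bool × Bool × Option String) (line : String) :
    List String × Bool × Bool × Option String :=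
  match st with
  | (result, in_doc, past, q) =>
    let stripped := PySem.Str.strip line
    if past then
      (result ++ [line], in_doc, past, q)
    else if in_doc then
      -- `if docstring_quote and docstring_quote in stripped` (truthiness of the quote string)
      if (match q with | some qq => (qq != "") && PySem.Str.isIn qq stripped | none => false) then
        (result, false, past, none)
      else
        (result, in_doc, past, q)
    else if PySem.Str.startswith stripped "\"\"\"" then
      if 2 ≤ PySem.Str.count stripped "\"\"\"" ∧ 3 < PySem.Str.len stripped then
        (result, in_doc, past, some "\"\"\"")  -- single-line docstring
      else
        (result, true, past, some "\"\"\"")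
    else if PySem.Str.startswith stripped "'''" then
      if 2 ≤ PySem.Str.count stripped "'''" ∧ 3 < PySem.Str.len stripped then
        (result, in_doc, past, some "'''")
      else
        (result, true, past, some "'''")
    else if PySem.Str.startswith stripped "import " || PySem.Str.startswith stripped "from " then
      (result, in_doc, past, q)
    else if PySem.Str.len stripped == 0 then
      (result, in_doc, past, q)
    else
      (result ++ [line], in_doc, true, q)

-- source.split("\n"): split? is none only for an empty separator, so getD [] is exact here
def extract_module_body_py (source : String) : String :=
  PySem.Str.join "\n"
    (((PySem.Str.split? source "\n").getD []).foldl pvStepA ([], false, false, none)).1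

-- ===== PORT B =====
-- inner while loop of B: drop lines up to and including the one containing the closing quote
def pvSkipDoc (q : String) : List String → List String
  | [] => []
  | l :: rest => if PySem.Str.isIn q (PySem.Str.strip l) then rest else pvSkipDoc q rest

theorem pvSkipDoc_length_le (q : String) (ls : List String) :
    (pvSkipDoc q ls).length ≤ ls.length := by
  induction ls with
  | nil => simp [pvSkipDoc]
  | cons l rest ih =>
    simp only [pvSkipDoc]
    split
    · simp
    · exact Nat.le_succ_of_le ih

-- outer while loop of B: advance past the header, return the untouched tail
def pvSkipHeader : List String → List String
  | [] => []
  | l :: rest =>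
    let s := PySem.Str.strip l
    if PySem.Str.startswith s "\"\"\"" then
      if 2 ≤ PySem.Str.count s "\"\"\"" ∧ 3 < PySem.Str.len s then
        pvSkipHeader rest
      else
        pvSkipHeader (pvSkipDoc "\"\"\"" rest)
    else if PySem.Str.startswith s "'''" then
      if 2 ≤ PySem.Str.count s "'''" ∧ 3 < PySem.Str.len s then
        pvSkipHeader rest
      else
        pvSkipHeader (pvSkipDoc "'''" rest)
    else if PySem.Str.len s == 0 || PySem.Str.startswith s "import " || PySem.Str.startswith s "from " then
      pvSkipHeader rest
    else
      l :: rest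
termination_by ls => ls.length
decreasing_by
  · simp
  · exact Nat.lt_succ_of_le (pvSkipDoc_length_le _ _)
  · simp
  · exact Nat.lt_succ_of_le (pvSkipDoc_length_le _ _)
  · simp

def extract_module_body_py_alt (source : String) : String :=
  PySem.Str.join "\n" (pvSkipHeader ((PySem.Str.split? source "\n").getD []))

-- ===== PRECONDITION & SPEC =====
def Spec_extract_module_body_py (source : String) (out : String) : Prop := out = extract_module_body_py_alt source
instance (source : String) (out : String) : Decidable (Spec_extract_module_body_py source out) := by unfold Spec_extract_module_body_py; infer_instance

-- ===== CLAIM (what is proved, stated in full; the proofs are below) =====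
def Claim_equal_extract_module_body_py : Prop := ∀ (source : String), Dom_extract_module_body_py source → Spec_extract_module_body_py source (extract_module_body_py source)

-- ===== LEMMAS AND PROOFS =====

-- once past_header is set, A appends every remaining line
theorem pvFoldA_past (ls : List String) (res : List String) (id : Bool) (q : Option String) :
    (ls.foldl pvStepA (res, id, true, q)).1 = res ++ ls := by
  induction ls generalizing res with
  | nil => simp
  | cons l rest ih => simp [pvStepA, ih]

-- while in a docstring, A's loop agrees with B's pvSkipDoc
theorem pvFoldA_doc (ls : List String) (res : List String) (qq : String) (h : (qq != "") = true) :
    (ls.foldl pvStepA (res, true, false, some qq)).1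
      = ((pvSkipDoc qq ls).foldl pvStepA (res, false, false, (none : Option String))).1 := by
  induction ls generalizing res with
  | nil => simp [pvSkipDoc]
  | cons l rest ih =>
    simp only [List.foldl_cons, pvSkipDoc]
    by_cases hin : PySem.Chars.isIn qq.toList (PySem.Chars.strip l.toList) = true
    · simp [pvStepA, h, hin]
    · simp [pvStepA, h, hin, ih]

-- the header phase of A computes B's pvSkipHeader
theorem pvFoldA_header (n : Nat) (ls : List String) (hn : ls.length ≤ n)
    (res : List String) (q : Option String) :
    (ls.foldl pvStepA (res, false, false, q)).1 = res ++ pvSkipHeader ls := by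
  induction n generalizing ls res q with
  | zero =>
    have : ls = [] := List.eq_nil_of_length_eq_zero (Nat.le_zero.mp hn)
    subst this; simp [pvSkipHeader]
  | succ n ih =>
    cases ls with
    | nil => simp [pvSkipHeader]
    | cons l rest =>
      have hrest : rest.length ≤ n := by simpa using hn
      rw [List.foldl_cons, pvSkipHeader]
      by_cases h1 : PySem.Chars.startswith (PySem.Chars.strip l.toList) ['\"', '\"', '\"'] = true
      · by_cases h2 : 2 ≤ PySem.Chars.count (PySem.Chars.strip l.toList) ['\"', '\"', '\"']
            ∧ 3 < (PySem.Chars.strip l.toList).length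
        · have hs : pvStepA (res, false, false, q) l = (res, false, false, some "\"\"\"") := by
            simp [pvStepA, h1, h2]
          rw [hs, ih rest hrest]
          simp [h1, h2]
        · have hs : pvStepA (res, false, false, q) l = (res, true, false, some "\"\"\"") := by
            simp [pvStepA, h1, h2]
          rw [hs, pvFoldA_doc _ _ _ (by decide),
            ih (pvSkipDoc "\"\"\"" rest) (le_trans (pvSkipDoc_length_le _ _) hrest)]
          simp [h1, h2]
      · by_cases h3 : PySem.Chars.startswith (PySem.Chars.strip l.toList) ['\'', '\'', '\''] = true
        · by_cases h4 : 2 ≤ PySem.Chars.count (PySem.Chars.strip l.toList) ['\'', '\'', '\'']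
              ∧ 3 < (PySem.Chars.strip l.toList).length
          · have hs : pvStepA (res, false, false, q) l = (res, false, false, some "'''") := by
              simp [pvStepA, h1, h3, h4]
            rw [hs, ih rest hrest]
            simp [h1, h3, h4]
          · have hs : pvStepA (res, false, false, q) l = (res, true, false, some "'''") := by
              simp [pvStepA, h1, h3, h4]
            rw [hs, pvFoldA_doc _ _ _ (by decide),
              ih (pvSkipDoc "'''" rest) (le_trans (pvSkipDoc_length_le _ _) hrest)]
            simp [h1, h3, h4]
        · by_cases h5 : PySem.Chars.startswith (PySem.Chars.strip l.toList) ['i', 'm', 'p', 'o', 'r', 't', ' '] = true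
              ∨ PySem.Chars.startswith (PySem.Chars.strip l.toList) ['f', 'r', 'o', 'm', ' '] = true
          · have hs : pvStepA (res, false, false, q) l = (res, false, false, q) := by
              rcases h5 with h5 | h5 <;> simp [pvStepA, h1, h3, h5]
            rw [hs, ih rest hrest]
            rcases h5 with h5 | h5 <;> simp [h1, h3, h5]
          · rw [not_or] at h5
            by_cases h6 : PySem.Chars.strip l.toList = []
            · have hq1 : PySem.Chars.startswith ([] : List Char) ['\"', '\"', '\"'] = false := by decide
              have hq2 : PySem.Chars.startswith ([] : List Char) ['\'', '\'', '\''] = false := by decide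
              have hs : pvStepA (res, false, false, q) l = (res, false, false, q) := by
                simp [pvStepA, h6, hq1, hq2]
              rw [hs, ih rest hrest]
              simp [h6, hq1, hq2]
            · have hs : pvStepA (res, false, false, q) l = (res ++ [l], false, true, q) := by
                simp [pvStepA, h1, h3, h5.1, h5.2, h6]
              rw [hs, pvFoldA_past]
              simp [h1, h3, h5.1, h5.2, h6]

-- ===== VERDICT (by name: the statement is the Claim_ definition above) =====
theorem extract_module_body_py_spec : Claim_equal_extract_module_body_py := by
  intro source _
  unfold Spec_extract_module_body_py extract_module_body_py extract_module_body_py_alt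
  rw [pvFoldA_header ((PySem.Str.split? source "\n").getD []).length _ (le_refl _)]
  simp
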